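-- pv_equiv track=rewrite | github.com/amindadgar/Evolutionary-Computing | HW4/generate_population_scripts.py | process_division_points
-- ===== SOURCE A (Python) =====
-- def find_depot_using(chromosome, depot_symbols_arr):
--     """
--     find the depot that the vehicle is using
--
--     """
--     ## to check the chromsome is whether using one or more depots
--     depot_count = 0
--
--     ## find the depot, related to the chromosome
--     depot_symbol = None
--     for depot in depot_symbols_arr:
--         depot_symbol_availability = chromosome.find(depot)
--         ## if it was available, then put the depot symbol
--         if depot_symbol_availability != -1:
--             depot_count += 1
--             # if depot_count > 1:
--             #     raise ValueError(f"Chromsome is using more than one depot!, the last found depot is: {depot}")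
--             depot_symbol = depot
--
--     return depot_symbol
--
-- def process_division_points(vehicle_chromosome, depot_symbol_arr, vehicle_depot_constraint):
--     """
--     Add the depot symbol after the division points
--     """
--     if vehicle_depot_constraint:
--         processed_vehicle_chromsome = vehicle_chromosome
--         depot_symbol = find_depot_using(processed_vehicle_chromsome, depot_symbol_arr)
--
--         division_counts = vehicle_chromosome.count('|')
--
--         occurance = 0
--         occurance_idx = 0
--         while occurance < division_counts:
--             occurance_idx = processed_vehicle_chromsome.find('|', occurance_idx) + 1
--             occurance += 1
--
--             processed_vehicle_chromsome = processed_vehicle_chromsome[:occurance_idx] + depot_symbol + processed_vehicle_chromsome[occurance_idx:]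
--     else:
--         processed_vehicle_chromsome = ''
--         chromsome_arr = vehicle_chromosome.split('|')
--         for idx in range(1, len(chromsome_arr)):
--             ## if the array index was not empty
--             if chromsome_arr[idx]:
--                 if chromsome_arr[idx - 1][-3:] in depot_symbol_arr:
--                     last_visited_depot = chromsome_arr[idx - 1][-3:]
--                     processed_vehicle_chromsome += last_visited_depot + chromsome_arr[idx] + '|'
--                 else:
--                     processed_vehicle_chromsome += chromsome_arr[idx]
--
--
--     return processed_vehicle_chromsome
-- ===== SOURCE B (Python) =====
-- def _find_depot(chromosome, depot_symbols_arr):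
--     ## last depot symbol occurring in the chromosome = first match of the reversed list
--     for depot in reversed(depot_symbols_arr):
--         if depot in chromosome:
--             return depot
--     return None
--
-- def process_division_points(vehicle_chromosome, depot_symbol_arr, vehicle_depot_constraint):
--     """
--     Add the depot symbol after the division points
--     """
--     if vehicle_depot_constraint:
--         depot_symbol = _find_depot(vehicle_chromosome, depot_symbol_arr)
--         parts = vehicle_chromosome.split('|')
--         result = parts[0]
--         for part in parts[1:]:
--             result += '|' + depot_symbol + part
--         return result
--     else:
--         parts = vehicle_chromosome.split('|')
--         pieces = []
--         for prev, cur in zip(parts, parts[1:]):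
--             if cur:
--                 tail = prev[-3:]
--                 pieces.append(tail + cur + '|' if tail in depot_symbol_arr else cur)
--         return ''.join(pieces)
-- ===== Notes on version B (the rewrite author's own statement) =====
-- stated objective: simpler
-- what changed: The constraint-true branch is rewritten as one split on '|' followed by a single linear re-joining pass (result = parts[0]; then '|' + depot + part for each later part) instead of A's index-tracking while-loop that repeatedly calls find('|') and rebuilds the whole string by slicing; the depot lookup scans the reversed list for the first match instead of folding over the whole list, and the else branch zips consecutive split parts instead of indexing with range(1, len). …
-- outside the precondition, e.g. on process_division_points('ab|cd|e', ['b|c'], True): A returns 'ab|b|b|cccd|e', B returns 'ab|b|ccd|b|ce'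
import Mathlib
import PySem

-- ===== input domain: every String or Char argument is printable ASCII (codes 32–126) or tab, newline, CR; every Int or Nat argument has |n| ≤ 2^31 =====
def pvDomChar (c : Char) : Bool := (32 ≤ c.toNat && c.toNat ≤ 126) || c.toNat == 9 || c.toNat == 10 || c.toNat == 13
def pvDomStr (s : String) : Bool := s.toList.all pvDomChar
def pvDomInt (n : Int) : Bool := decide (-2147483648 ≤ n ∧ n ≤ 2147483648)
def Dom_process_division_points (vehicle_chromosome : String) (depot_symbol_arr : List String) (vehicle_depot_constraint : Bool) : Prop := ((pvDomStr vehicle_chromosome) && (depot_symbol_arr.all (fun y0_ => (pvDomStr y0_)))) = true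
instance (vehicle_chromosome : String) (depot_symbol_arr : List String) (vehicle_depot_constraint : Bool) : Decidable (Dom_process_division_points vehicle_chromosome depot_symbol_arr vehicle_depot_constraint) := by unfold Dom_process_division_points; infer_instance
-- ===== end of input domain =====

-- B replaces A's index-tracking find/slice-insert while-loop by a single split on '|'
-- followed by one linear pass that re-joins the tokens with the depot symbol inserted
-- after each separator; the depot lookup scans the reversed list for the first match and
-- the else branch zips consecutive split parts; equal on every admitted input.


-- ===== PORT A =====

-- helper find_depot_using: fold keeping the LAST depot symbol found in the chromosome
-- (depot_count is carried as in the Python, though unused in the result)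
def find_depot_using (chromosome : String) (depot_symbols_arr : List String) : Option String :=
  (depot_symbols_arr.foldl
    (fun (st : Int × Option String) depot =>
      let depot_symbol_availability := PySem.Str.find chromosome depot
      if depot_symbol_availability ≠ -1 then (st.1 + 1, some depot) else st)
    ((0 : Int), (none : Option String))).2

-- A's while-loop: idx := find('|', idx) + 1; insert the depot symbol at idx
def pdpLoopA (depot : List Char) : Nat → List Char → Int → List Char
  | 0, s, _ => s
  | n + 1, s, i =>
    let idx := PySem.Chars.findFrom s ['|'] i + 1
    let s' := PySem.Chars.slice s none (some idx) ++ depot ++ PySem.Chars.slice s (some idx) none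
    pdpLoopA depot n s' idx

def process_division_points (vehicle_chromosome : String) (depot_symbol_arr : List String) (vehicle_depot_constraint : Bool) : String :=
  if vehicle_depot_constraint then
    let depot_symbol := find_depot_using vehicle_chromosome depot_symbol_arr
    let division_counts := PySem.Str.count vehicle_chromosome "|"
    -- depot_symbol = none with division_counts > 0 raises TypeError in Python (excluded by Pre_);
    -- the .getD [] below is only reached outside Pre_
    String.ofList (pdpLoopA ((depot_symbol.map String.toList).getD []) division_counts vehicle_chromosome.toList 0)
  else
    let chromsome_arr := PySem.Chars.splitOn vehicle_chromosome.toList ['|']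
    let arrL := depot_symbol_arr.map String.toList
    String.ofList ((PySem.List.pyRange 1 (chromsome_arr.length : Int) 1).foldl
      (fun acc idx =>
        let cur := PySem.List.pyGetD chromsome_arr idx []
        if cur ≠ [] then
          let tail3 := PySem.Chars.slice (PySem.List.pyGetD chromsome_arr (idx - 1) []) (some (-3)) none
          if tail3 ∈ arrL then acc ++ tail3 ++ cur ++ ['|']
          else acc ++ cur
        else acc) [])

-- ===== PORT B =====

-- B's depot lookup: first match of the reversed list (= last matching symbol)
def pdpFindDepot (chromosome : String) (depot_symbols_arr : List String) : Option String :=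
  depot_symbols_arr.reverse.find? (fun depot => PySem.Str.isIn depot chromosome)

def process_division_points_alt (vehicle_chromosome : String) (depot_symbol_arr : List String) (vehicle_depot_constraint : Bool) : String :=
  if vehicle_depot_constraint then
    let d := (((pdpFindDepot vehicle_chromosome depot_symbol_arr).map String.toList).getD [])
    -- parts[0] always exists (split never returns an empty list); the [] arm is unreachable
    match PySem.Chars.splitOn vehicle_chromosome.toList ['|'] with
    | [] => ""
    | head :: rest =>
      String.ofList (rest.foldl (fun acc part => acc ++ '|' :: (d ++ part)) head)
  else
    let parts := PySem.Chars.splitOn vehicle_chromosome.toList ['|']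
    let arrL := depot_symbol_arr.map String.toList
    String.ofList (((parts.zip parts.tail).map (fun pc =>
      if pc.2 ≠ [] then
        let tail3 := PySem.Chars.slice pc.1 (some (-3)) none
        if tail3 ∈ arrL then tail3 ++ pc.2 ++ ['|'] else pc.2
      else [])).flatten)

-- ===== PRECONDITION & SPEC =====

-- Pre_ excludes, when the constraint is set and the chromosome has a division point '|':
-- (a) inputs where no depot symbol occurs in the chromosome — Python A (and B) raise
-- TypeError concatenating None there; and (b) inputs whose matched (last occurring) depot
-- symbol itself contains the separator '|' — there A rescans the partially rebuilt string
-- and may insert inside the just-inserted depot text, an accidental, unspecified corner.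
def Pre_process_division_points (vehicle_chromosome : String) (depot_symbol_arr : List String) (vehicle_depot_constraint : Bool) : Prop :=
  vehicle_depot_constraint = true → 0 < PySem.Str.count vehicle_chromosome "|" →
    ∃ i < depot_symbol_arr.length,
      PySem.Str.isIn (depot_symbol_arr.getD i "") vehicle_chromosome = true ∧
      '|' ∉ (depot_symbol_arr.getD i "").toList ∧
      ∀ j < depot_symbol_arr.length, i < j →
        PySem.Str.isIn (depot_symbol_arr.getD j "") vehicle_chromosome = false

instance (vehicle_chromosome : String) (depot_symbol_arr : List String) (vehicle_depot_constraint : Bool) : Decidable (Pre_process_division_points vehicle_chromosome depot_symbol_arr vehicle_depot_constraint) := by unfold Pre_process_division_points; infer_instance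

def pvWitness_process_division_points : String × List String × Bool := ("aD1|bb|c", ["D1"], true)

def Spec_process_division_points (vehicle_chromosome : String) (depot_symbol_arr : List String) (vehicle_depot_constraint : Bool) (out : String) : Prop := out = process_division_points_alt vehicle_chromosome depot_symbol_arr vehicle_depot_constraint
instance (vehicle_chromosome : String) (depot_symbol_arr : List String) (vehicle_depot_constraint : Bool) (out : String) : Decidable (Spec_process_division_points vehicle_chromosome depot_symbol_arr vehicle_depot_constraint out) := by unfold Spec_process_division_points; infer_instance

-- ===== CLAIM (what is proved, stated in full; the proofs are below) =====
def Claim_equal_process_division_points : Prop := ∀ (vehicle_chromosome : String) (depot_symbol_arr : List String) (vehicle_depot_constraint : Bool), Dom_process_division_points vehicle_chromosome depot_symbol_arr vehicle_depot_constraint → Pre_process_division_points vehicle_chromosome depot_symbol_arr vehicle_depot_constraint → Spec_process_division_points vehicle_chromosome depot_symbol_arr vehicle_depot_constraint (process_division_points vehicle_chromosome depot_symbol_arr vehicle_depot_constraint)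

-- ===== LEMMAS AND PROOFS =====

-- structural model of splitting on a single character (proof-only helper)
def pvSplit (c : Char) : List Char → List Char → List (List Char)
  | pre, [] => [pre]
  | pre, x :: xs => if x = c then pre :: pvSplit c [] xs else pvSplit c (pre ++ [x]) xs

-- proof-only copies of the two else-branch loop bodies, for rewriting
def pvGB (arrL : List (List Char)) (prev cur : List Char) : List Char :=
  if cur ≠ [] then
    let tail3 := PySem.Chars.slice prev (some (-3)) none
    if tail3 ∈ arrL then tail3 ++ cur ++ ['|'] else cur
  else []

def pvABody (parts : List (List Char)) (arrL : List (List Char)) : List Char → Int → List Char :=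
  fun acc idx =>
    let cur := PySem.List.pyGetD parts idx []
    if cur ≠ [] then
      let tail3 := PySem.Chars.slice (PySem.List.pyGetD parts (idx - 1) []) (some (-3)) none
      if tail3 ∈ arrL then acc ++ tail3 ++ cur ++ ['|']
      else acc ++ cur
    else acc

theorem pvSplit_go (c : Char) : ∀ (fuel : Nat) (l cur : List Char) (acc : List (List Char)),
    l.length ≤ fuel →
    PySem.Chars.splitOn.go [c] fuel l cur acc = acc.reverse ++ pvSplit c cur.reverse l := by
  intro fuel
  induction fuel with
  | zero =>
    intro l cur acc h
    have hl : l = [] := List.eq_nil_of_length_eq_zero (Nat.le_zero.mp h)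
    subst hl
    simp [PySem.Chars.splitOn.go, pvSplit]
  | succ fuel ih =>
    intro l cur acc h
    cases l with
    | nil => simp [PySem.Chars.splitOn.go, pvSplit]
    | cons x xs =>
      rw [PySem.Chars.splitOn.go]
      by_cases hx : x = c
      · subst hx
        have hpref : List.isPrefixOf [x] (x :: xs) = true := by
          simp [List.isPrefixOf]
        simp only [hpref, if_true]
        rw [ih _ _ _ (by simpa using Nat.le_of_succ_le_succ h)]
        simp [pvSplit]
      · have hpref : List.isPrefixOf [c] (x :: xs) = false := by
          simp [List.isPrefixOf]
          exact fun hc => absurd hc.symm hx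
        simp only [hpref, Bool.false_eq_true, if_false]
        rw [ih _ _ _ (by simpa using Nat.le_of_succ_le_succ h)]
        simp [pvSplit, hx]

theorem pvSplit_splitOn (c : Char) (l : List Char) :
    PySem.Chars.splitOn l [c] = pvSplit c [] l := by
  rw [PySem.Chars.splitOn, pvSplit_go c _ _ _ _ (by omega)]
  simp

theorem pvCount_go (c : Char) : ∀ (fuel : Nat) (l : List Char) (acc : Nat),
    l.length ≤ fuel → PySem.Chars.count.go [c] fuel l acc = acc + l.count c := by
  intro fuel
  induction fuel with
  | zero =>
    intro l acc h
    have hl : l = [] := List.eq_nil_of_length_eq_zero (Nat.le_zero.mp h)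
    subst hl
    simp [PySem.Chars.count.go]
  | succ fuel ih =>
    intro l acc h
    cases l with
    | nil => simp [PySem.Chars.count.go]
    | cons x xs =>
      rw [PySem.Chars.count.go]
      by_cases hx : x = c
      · subst hx
        have hpref : List.isPrefixOf [x] (x :: xs) = true := by
          simp [List.isPrefixOf]
        simp only [hpref, if_true]
        rw [ih _ _ (by simpa using Nat.le_of_succ_le_succ h)]
        simp
        omega
      · have hpref : List.isPrefixOf [c] (x :: xs) = false := by
          simp [List.isPrefixOf]
          exact fun hc => absurd hc.symm hx
        simp only [hpref, Bool.false_eq_true, if_false]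
        rw [ih _ _ (by simpa using Nat.le_of_succ_le_succ h)]
        simp [hx]

theorem pvCount_char (c : Char) (l : List Char) :
    PySem.Chars.count l [c] = l.count c := by
  rw [PySem.Chars.count]
  simp only [List.isEmpty_cons, Bool.false_eq_true, if_false]
  rw [pvCount_go c _ _ _ (le_refl _)]
  omega

theorem pvStrCount (s : String) : PySem.Str.count s "|" = s.toList.count '|' := by
  rw [PySem.Str.count_eq, show ("|" : String).toList = ['|'] from rfl, pvCount_char]

theorem pvSplit_ne_nil (c : Char) : ∀ (l pre : List Char), pvSplit c pre l ≠ [] := by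
  intro l
  induction l with
  | nil => intro pre; simp [pvSplit]
  | cons x xs ih =>
    intro pre
    by_cases hx : x = c <;> simp [pvSplit, hx, ih]

theorem pvJoin_cons_of_ne_nil (c : Char) (a : List Char) {l : List (List Char)} (h : l ≠ []) :
    PySem.Chars.join [c] (a :: l) = a ++ c :: PySem.Chars.join [c] l := by
  cases l with
  | nil => exact absurd rfl h
  | cons b bs =>
    rw [PySem.Chars.join_cons_cons]
    simp

theorem pvJoin_pvSplit (c : Char) : ∀ (l pre : List Char),
    PySem.Chars.join [c] (pvSplit c pre l) = pre ++ l := by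
  intro l
  induction l with
  | nil => intro pre; simp [pvSplit, PySem.Chars.join_singleton]
  | cons x xs ih =>
    intro pre
    by_cases hx : x = c
    · subst hx
      rw [pvSplit, if_pos rfl, pvJoin_cons_of_ne_nil x pre (pvSplit_ne_nil x xs []), ih]
      simp
    · rw [pvSplit, if_neg hx, ih]
      simp

theorem pvMem_pvSplit (c : Char) : ∀ (l pre : List Char), c ∉ pre →
    ∀ t ∈ pvSplit c pre l, c ∉ t := by
  intro l
  induction l with
  | nil =>
    intro pre hpre t ht
    simp [pvSplit] at ht
    subst ht; exact hpre
  | cons x xs ih =>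
    intro pre hpre t ht
    by_cases hx : x = c
    · subst hx
      rw [pvSplit, if_pos rfl] at ht
      rcases List.mem_cons.mp ht with h | h
      · subst h; exact hpre
      · exact ih [] (by simp) t h
    · rw [pvSplit, if_neg hx] at ht
      refine ih (pre ++ [x]) ?_ t ht
      simp [hpre]
      exact fun hc => hx hc.symm

theorem pvLength_pvSplit (c : Char) : ∀ (l pre : List Char),
    (pvSplit c pre l).length = l.count c + 1 := by
  intro l
  induction l with
  | nil => intro pre; simp [pvSplit]
  | cons x xs ih =>
    intro pre
    by_cases hx : x = c <;>
      simp [pvSplit, hx, ih]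

-- join ((x ++ y) :: zs) = x ++ join (y :: zs)
theorem pvJoin_cons_append (c : Char) (x y : List Char) (zs : List (List Char)) :
    PySem.Chars.join [c] ((x ++ y) :: zs) = x ++ PySem.Chars.join [c] (y :: zs) := by
  cases zs with
  | nil => simp [PySem.Chars.join_singleton]
  | cons z zs =>
    rw [PySem.Chars.join_cons_cons, PySem.Chars.join_cons_cons]
    simp

theorem pvFind_token (t z : List Char) (ht : '|' ∉ t) :
    PySem.Chars.find (t ++ '|' :: z) ['|'] = (t.length : Int) := by
  have hinf : ['|'] <:+: (t ++ '|' :: z) := ⟨t, z, by simp⟩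
  have h0 : 0 ≤ PySem.Chars.find (t ++ '|' :: z) ['|'] :=
    (PySem.Chars.find_nonneg_iff _ _).mpr hinf
  obtain ⟨hpre, hmin⟩ := PySem.Chars.find_spec h0
  set j := (PySem.Chars.find (t ++ '|' :: z) ['|']).toNat with hj
  have hj_le : j ≤ t.length := by
    by_contra h'
    refine hmin t.length (by omega) ?_
    rw [show t ++ '|' :: z = t ++ ('|' :: z) from rfl, List.drop_left]
    exact ⟨z, rfl⟩
  have hj_eq : j = t.length := by
    rcases Nat.lt_or_ge j t.length with hlt | hge
    · exfalso
      rw [List.drop_append_of_le_length (Nat.le_of_lt hlt),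
        List.drop_eq_getElem_cons hlt] at hpre
      obtain ⟨l', hl', -⟩ := List.cons_prefix_iff.mp hpre
      injection hl' with h1 _
      exact ht (h1 ▸ List.getElem_mem hlt)
    · omega
  have := Int.toNat_of_nonneg h0
  omega

theorem pvFindFrom_pre (pre t z : List Char) (ht : '|' ∉ t) :
    PySem.Chars.findFrom (pre ++ (t ++ '|' :: z)) ['|'] (pre.length : Int)
      = ((pre.length + t.length : Nat) : Int) := by
  rw [PySem.Chars.findFrom_natCast _ _ pre.length (by simp), List.drop_left,
    pvFind_token t z ht]
  have : ¬ ((t.length : Int) = -1) := by omega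
  simp only [this, if_false]
  push_cast
  ring

-- the heart of the equivalence: A's r insertion steps on the joined token list equal
-- B's single pass (token ++ '|' ++ depot ++ token ++ …), when depot and tokens are '|'-free
theorem pvLoopA_split (d : List Char) (hd : '|' ∉ d) :
    ∀ (r : Nat) (pre t : List Char) (rest : List (List Char)),
    '|' ∉ t → (∀ u ∈ rest, '|' ∉ u) → rest.length = r →
    pdpLoopA d r (pre ++ PySem.Chars.join ['|'] (t :: rest)) (pre.length : Int)
      = pre ++ t ++ rest.flatMap (fun p => '|' :: (d ++ p)) := by
  intro r
  induction r with
  | zero =>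
    intro pre t rest _ _ hlen
    have : rest = [] := List.eq_nil_of_length_eq_zero hlen
    subst this
    simp [pdpLoopA, PySem.Chars.join_singleton]
  | succ r ih =>
    intro pre t rest ht hfree hlen
    cases rest with
    | nil => simp at hlen
    | cons t2 ts =>
      have ht2 : '|' ∉ t2 := hfree t2 (by simp)
      have hts : ∀ u ∈ ts, '|' ∉ u := fun u hu => hfree u (by simp [hu])
      have hjoin : PySem.Chars.join ['|'] (t :: t2 :: ts)
          = t ++ '|' :: PySem.Chars.join ['|'] (t2 :: ts) := by
        rw [PySem.Chars.join_cons_cons]; simp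
      set J := PySem.Chars.join ['|'] (t2 :: ts) with hJ
      set P := pre ++ t ++ ['|'] with hPdef
      have hsP : pre ++ PySem.Chars.join ['|'] (t :: t2 :: ts) = P ++ J := by
        rw [hjoin, hPdef]; simp
      have hPlen : P.length = pre.length + t.length + 1 := by
        simp only [hPdef, List.length_append, List.length_cons, List.length_nil]
      rw [pdpLoopA]
      have hfind : PySem.Chars.findFrom (pre ++ PySem.Chars.join ['|'] (t :: t2 :: ts)) ['|']
          (pre.length : Int) = ((pre.length + t.length : Nat) : Int) := by
        rw [hjoin]
        exact pvFindFrom_pre pre t J ht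
      rw [hfind]
      have hidx : ((pre.length + t.length : Nat) : Int) + 1 = ((P.length : Nat) : Int) := by
        rw [hPlen]; push_cast; ring
      rw [hidx]
      have hslice1 : PySem.Chars.slice (pre ++ PySem.Chars.join ['|'] (t :: t2 :: ts)) none
          (some ((P.length : Nat) : Int)) = P := by
        rw [hsP, PySem.Chars.slice_eq_listSlice, PySem.List.slice_to_natCast, List.take_left]
      have hslice2 : PySem.Chars.slice (pre ++ PySem.Chars.join ['|'] (t :: t2 :: ts))
          (some ((P.length : Nat) : Int)) none = J := by
        rw [hsP, PySem.Chars.slice_eq_listSlice, PySem.List.slice_from_natCast, List.drop_left]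
      rw [hslice1, hslice2]
      have hrem : P ++ d ++ J = P ++ PySem.Chars.join ['|'] ((d ++ t2) :: ts) := by
        rw [pvJoin_cons_append, hJ]
        simp
      rw [hrem]
      have hIH := ih P (d ++ t2) ts
        (by intro hc; rcases List.mem_append.mp hc with h | h; exacts [hd h, ht2 h])
        hts (by simpa using Nat.succ_injective hlen)
      rw [hIH]
      simp [hPdef]

-- A's fold over the depot list keeps the LAST match; B's reverse-find? finds it first
theorem pvDepot_fold (vc : String) : ∀ (arr : List String) (st : Int × Option String),
    (arr.foldl
      (fun (st : Int × Option String) depot =>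
        let depot_symbol_availability := PySem.Str.find vc depot
        if depot_symbol_availability ≠ -1 then (st.1 + 1, some depot) else st) st).2
    = (arr.reverse.find? (fun depot => PySem.Str.isIn depot vc)).or st.2 := by
  intro arr
  induction arr with
  | nil => intro st; simp
  | cons a as ih =>
    intro st
    rw [List.foldl_cons, ih, List.reverse_cons, List.find?_append]
    rw [Option.or_assoc]
    congr 1
    by_cases hin : a.toList <:+: vc.toList
    · have h1 : PySem.Chars.find vc.toList a.toList ≠ -1 :=
        (PySem.Chars.find_ne_neg_one_iff _ _).mpr hin
      have h2 : PySem.Chars.isIn a.toList vc.toList = true :=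
        (PySem.Chars.isIn_iff_infix _ _).mpr hin
      simp [h1, h2]
    · have h1 : PySem.Chars.find vc.toList a.toList = -1 := by
        by_contra hne
        exact hin ((PySem.Chars.find_ne_neg_one_iff _ _).mp hne)
      have h2 : PySem.Chars.isIn a.toList vc.toList = false := by
        rcases Bool.eq_false_or_eq_true (PySem.Chars.isIn a.toList vc.toList) with hb | hb
        · exact absurd ((PySem.Chars.isIn_iff_infix _ _).mp hb) hin
        · exact hb
      simp [h1, h2]

theorem pvDepot_eq (vc : String) (arr : List String) :
    find_depot_using vc arr = pdpFindDepot vc arr := by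
  rw [find_depot_using, pdpFindDepot, pvDepot_fold]
  simp

-- find? on the reversed list returns the last element satisfying p
theorem pvFindRev_last {p : String → Bool} (arr : List String) (i : Nat)
    (hi : i < arr.length) (hp : p (arr.getD i "") = true)
    (hafter : ∀ j : Nat, i < j → j < arr.length → p (arr.getD j "") = false) :
    arr.reverse.find? p = some (arr.getD i "") := by
  conv_lhs => rw [← List.take_append_drop (i + 1) arr]
  rw [List.reverse_append, List.find?_append]
  have hnone : (arr.drop (i + 1)).reverse.find? p = none := by
    refine List.find?_eq_none.mpr ?_
    intro x hx
    rw [List.mem_reverse] at hx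
    obtain ⟨k, hk, hxk⟩ := List.getElem_of_mem hx
    rw [List.getElem_drop] at hxk
    have hlt : i + 1 + k < arr.length := by
      rw [List.length_drop] at hk; omega
    have := hafter (i + 1 + k) (by omega) hlt
    rw [List.getD_eq_getElem _ _ hlt, hxk] at this
    simp [this]
  rw [hnone, Option.none_or]
  have htake : arr.take (i + 1) = arr.take i ++ [arr[i]] := by
    rw [List.take_succ, List.getElem?_eq_getElem hi]
    simp
  rw [htake, List.reverse_append]
  have hgd : arr.getD i "" = arr[i] := List.getD_eq_getElem _ _ hi
  rw [hgd] at hp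
  simp [hp, List.getElem?_eq_getElem hi]

theorem pvZipMap (g : List Char → List Char → List Char) :
    ∀ (rest : List (List Char)) (done : List (List Char)) (p : List Char),
    (PySem.List.pyRange ((done.length + 1 : Nat) : Int) ((done.length + 1 + rest.length : Nat) : Int) 1).map
      (fun idx => g (PySem.List.pyGetD (done ++ p :: rest) (idx - 1) []) (PySem.List.pyGetD (done ++ p :: rest) idx []))
      = ((p :: rest).zip rest).map (fun pc => g pc.1 pc.2) := by
  intro rest
  induction rest with
  | nil =>
    intro done p
    have h : PySem.List.pyRange ((done.length + 1 : Nat) : Int)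
        ((done.length + 1 + ([] : List (List Char)).length : Nat) : Int) 1 = [] := by
      simp [PySem.List.pyRange]
    rw [h]
    simp
  | cons q rs ih =>
    intro done p
    have hlt : ((done.length + 1 : Nat) : Int) < ((done.length + 1 + (q :: rs).length : Nat) : Int) := by
      have : done.length + 1 < done.length + 1 + (q :: rs).length := by simp
      exact_mod_cast this
    rw [PySem.List.pyRange_one_cons hlt]
    simp only [List.map_cons]
    have e1 : ((done.length + 1 : Nat) : Int) - 1 = ((done.length : Nat) : Int) := by
      push_cast; ring
    have hh1 : PySem.List.pyGetD (done ++ p :: q :: rs) (((done.length + 1 : Nat) : Int) - 1) [] = p := by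
      rw [e1, PySem.List.pyGetD_natCast]; simp
    have hh2 : PySem.List.pyGetD (done ++ p :: q :: rs) ((done.length + 1 : Nat) : Int) [] = q := by
      rw [PySem.List.pyGetD_natCast]; simp
    rw [hh1, hh2]
    have e2 : done ++ p :: q :: rs = (done ++ [p]) ++ q :: rs := by simp
    have e3 : ((done.length + 1 : Nat) : Int) + 1 = (((done ++ [p]).length + 1 : Nat) : Int) := by
      have hl : (done ++ [p]).length = done.length + 1 := by simp
      rw [hl]; push_cast; ring
    have e4 : ((done.length + 1 + (q :: rs).length : Nat) : Int)
        = (((done ++ [p]).length + 1 + rs.length : Nat) : Int) := by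
      have hl : (done ++ [p]).length = done.length + 1 := by simp
      have hl2 : (q :: rs).length = rs.length + 1 := by simp
      rw [hl, hl2]; push_cast; ring
    rw [e2, e3, e4, ih (done ++ [p]) q]
    simp

theorem pvABody_eq (parts arrL : List (List Char)) (acc : List Char) (idx : Int) :
    pvABody parts arrL acc idx
      = acc ++ pvGB arrL (PySem.List.pyGetD parts (idx - 1) []) (PySem.List.pyGetD parts idx []) := by
  by_cases h1 : PySem.List.pyGetD parts idx [] = []
  · simp [pvABody, pvGB, h1]
  · by_cases h2 : PySem.List.slice (PySem.List.pyGetD parts (idx - 1) []) (some (-3)) none ∈ arrL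
    · simp [pvABody, pvGB, h1, h2]
    · simp [pvABody, pvGB, h1, h2]

theorem pvJoin_split_self (vc : String) :
    PySem.Chars.join ['|'] (PySem.Chars.splitOn vc.toList ['|']) = vc.toList := by
  rw [pvSplit_splitOn, pvJoin_pvSplit]
  simp

theorem pvElse (vc : String) (arr : List String) :
    process_division_points vc arr false = process_division_points_alt vc arr false := by
  change String.ofList (List.foldl
      (pvABody (PySem.Chars.splitOn vc.toList ['|']) (arr.map String.toList)) []
      (PySem.List.pyRange 1 (((PySem.Chars.splitOn vc.toList ['|']).length : Nat) : Int) 1))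
    = String.ofList ((((PySem.Chars.splitOn vc.toList ['|']).zip
        (PySem.Chars.splitOn vc.toList ['|']).tail).map
        (fun pc => pvGB (arr.map String.toList) pc.1 pc.2)).flatten)
  congr 1
  set parts := PySem.Chars.splitOn vc.toList ['|'] with hparts
  set arrL := arr.map String.toList with harrL
  have hfun : pvABody parts arrL = fun acc idx =>
      acc ++ pvGB arrL (PySem.List.pyGetD parts (idx - 1) []) (PySem.List.pyGetD parts idx []) := by
    funext acc idx
    exact pvABody_eq parts arrL acc idx
  rw [hfun, PySem.List.foldl_append_eq_flatMap, List.flatMap_def, List.nil_append]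
  have hne : parts ≠ [] := by
    rw [hparts, pvSplit_splitOn]; exact pvSplit_ne_nil _ _ _
  obtain ⟨p, rest, hpr⟩ : ∃ p rest, parts = p :: rest := by
    cases hp : parts with
    | nil => exact absurd hp hne
    | cons a b => exact ⟨a, b, rfl⟩
  rw [hpr]
  have hz := pvZipMap (pvGB arrL) rest [] p
  simp only [List.length_nil, List.nil_append, Nat.zero_add] at hz
  have hb1 : ((1 : Nat) : Int) = (1 : Int) := by norm_num
  have hb2 : ((1 + rest.length : Nat) : Int) = (((p :: rest).length : Nat) : Int) := by
    simp only [List.length_cons]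
    push_cast; omega
  rw [hb1, hb2] at hz
  rw [hz]
  simp

-- B's fold over the tail tokens equals head ++ flatMap
theorem pvFoldB_flatMap (d head : List Char) (rest : List (List Char)) :
    rest.foldl (fun acc part => acc ++ '|' :: (d ++ part)) head
      = head ++ rest.flatMap (fun p => '|' :: (d ++ p)) := by
  exact PySem.List.foldl_append_eq_flatMap _ _ _

-- ===== VERDICT (by name: the statement is the Claim_ definition above) =====
theorem process_division_points_spec : Claim_equal_process_division_points := by
  unfold Claim_equal_process_division_points
  intro vc arr cstr _hDom hPre
  unfold Spec_process_division_points
  cases cstr with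
  | false => exact pvElse vc arr
  | true =>
    obtain ⟨head, rest, hpr⟩ : ∃ h r, PySem.Chars.splitOn vc.toList ['|'] = h :: r := by
      cases hp : PySem.Chars.splitOn vc.toList ['|'] with
      | nil =>
        exfalso
        rw [pvSplit_splitOn] at hp
        exact pvSplit_ne_nil '|' vc.toList [] hp
      | cons a b => exact ⟨a, b, rfl⟩
    have hlenparts : rest.length = PySem.Str.count vc "|" := by
      have := pvLength_pvSplit '|' vc.toList []
      rw [← pvSplit_splitOn, hpr] at this
      rw [pvStrCount]
      simpa using this
    have hfree : ∀ t ∈ PySem.Chars.splitOn vc.toList ['|'], '|' ∉ t := by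
      rw [pvSplit_splitOn]
      exact pvMem_pvSplit '|' vc.toList [] (by simp)
    have hjoin : PySem.Chars.join ['|'] (head :: rest) = vc.toList := by
      rw [← hpr, pvJoin_split_self]
    by_cases hcnt : PySem.Str.count vc "|" = 0
    · -- no division point: A does 0 insertions, B folds over the empty tail
      have hrest : rest = [] := by
        apply List.eq_nil_of_length_eq_zero; rw [hlenparts, hcnt]
      subst hrest
      have hvc : head = vc.toList := by
        rw [← hjoin, PySem.Chars.join_singleton]
      rw [process_division_points, process_division_points_alt, if_pos rfl, if_pos rfl, hpr]
      rw [hcnt]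
      change String.ofList vc.toList = String.ofList head
      rw [hvc]
    · -- at least one division point: Pre_ provides the '|'-free matched depot
      obtain ⟨i, hi, hmatch, hnobar, hafter⟩ := hPre rfl (Nat.pos_of_ne_zero hcnt)
      set dep := arr.getD i "" with hdep
      have hB : pdpFindDepot vc arr = some dep :=
        pvFindRev_last arr i hi hmatch (fun j h1 h2 => hafter j h2 h1)
      have hA : find_depot_using vc arr = some dep := by
        rw [pvDepot_eq]; exact hB
      rw [process_division_points, process_division_points_alt, if_pos rfl, if_pos rfl,
        hA, hB, hpr]
      change String.ofList (pdpLoopA dep.toList (PySem.Str.count vc "|") vc.toList 0)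
        = String.ofList (rest.foldl (fun acc part => acc ++ '|' :: (dep.toList ++ part)) head)
      congr 1
      have hmain := pvLoopA_split dep.toList hnobar (PySem.Str.count vc "|") [] head rest
        (hfree head (by rw [hpr]; simp))
        (fun u hu => hfree u (by rw [hpr]; simp [hu]))
        hlenparts
      simp only [List.nil_append, List.length_nil, Nat.cast_zero] at hmain
      rw [hjoin] at hmain
      rw [hmain, pvFoldB_flatMap]
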